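-- pv_equiv track=rewrite | github.com/Reportify/teleopsold | teleops_backend/core/middleware/permission_enforcement.py | _check_feature_permission
-- ===== SOURCE A (Python) =====
-- def _check_feature_permission(user_permission_codes, resource_type, required_actions):
--     """Check if user has the required actions for a resource type"""
--     # Check for specific action permissions (exact match)
--     for action in required_actions:
--         permission_code = f"{resource_type}.{action}"
--         if permission_code in user_permission_codes:
--             return True
--
--     # Check for compound permissions (e.g., site.read_create for create action)
--     for code in user_permission_codes:
--         if code.startswith(f"{resource_type}."):
--             # Extract actions from permission code
--             if '.' in code:
--                 actions_part = code.split('.', 1)[1]  # Get part after 'resource.'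
--                 user_actions = actions_part.split('_')
--                 # Check if all required actions are covered
--                 if all(action in user_actions for action in required_actions):
--                     return True
--
--     return False
-- ===== SOURCE B (Python) =====
-- def _check_feature_permission(user_permission_codes, resource_type, required_actions):
--     """Single pass over the user's codes: exact-match set + compound check per code."""
--     prefix = f"{resource_type}."
--     exact = {prefix + action for action in required_actions}
--     for code in user_permission_codes:
--         if code in exact:
--             return True
--         if code.startswith(prefix):
--             user_actions = code.split('.', 1)[1].split('_')
--             if all(action in user_actions for action in required_actions):
--                 return True
--     return False
-- ===== Notes on version B (the rewrite author's own statement) =====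
-- stated objective: simpler
-- what changed: Replaces A's two sequential passes (first over required_actions probing the code list per action, then over codes) with a single pass over user_permission_codes that tests each code against a precomputed exact-match set and then the compound condition, dropping A's redundant "'.' in code" guard.
import Mathlib
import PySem

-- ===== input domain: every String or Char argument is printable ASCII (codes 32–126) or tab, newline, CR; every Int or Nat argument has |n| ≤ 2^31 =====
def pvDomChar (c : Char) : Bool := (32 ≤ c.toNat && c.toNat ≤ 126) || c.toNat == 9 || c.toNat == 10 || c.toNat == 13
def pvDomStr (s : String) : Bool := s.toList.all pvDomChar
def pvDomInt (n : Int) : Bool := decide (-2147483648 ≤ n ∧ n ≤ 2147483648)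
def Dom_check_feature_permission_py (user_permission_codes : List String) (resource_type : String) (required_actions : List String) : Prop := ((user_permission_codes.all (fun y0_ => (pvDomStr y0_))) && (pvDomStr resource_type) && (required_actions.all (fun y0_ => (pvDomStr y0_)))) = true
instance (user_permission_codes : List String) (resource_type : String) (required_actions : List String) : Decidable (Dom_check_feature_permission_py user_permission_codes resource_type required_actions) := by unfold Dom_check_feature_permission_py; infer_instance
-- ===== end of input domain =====

-- B replaces A's two sequential passes (one per required action, then one per code) by ONE pass
-- over the user's codes against a precomputed exact-match set (objective: simpler).

-- ===== PORT A =====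
-- A: user_actions = code.split('.', 1)[1].split('_').  The [1] index is reachable only under the
-- "'.' in code" guard, where split('.', 1) has exactly two parts, so the getD defaults never fire.
def pvA_userActions (code : String) : List String :=
  (PySem.Str.split? (PySem.List.pyGetD ((PySem.Str.splitMax? code "." 1).getD []) 1 "") "_").getD []

def check_feature_permission_py (user_permission_codes : List String) (resource_type : String) (required_actions : List String) : Bool :=
  -- first loop: exact-match permission codes, early return True
  if required_actions.any (fun action => user_permission_codes.contains (resource_type ++ "." ++ action)) then true
  -- second loop: compound permissions
  else user_permission_codes.any (fun code =>
    if PySem.Str.startswith code (resource_type ++ ".") then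
      if PySem.Str.isIn "." code then
        required_actions.all (fun action => (pvA_userActions code).contains action)
      else false
    else false)

-- ===== PORT B =====
def pvB_userActions (code : String) : List String :=
  (PySem.Str.split? (PySem.List.pyGetD ((PySem.Str.splitMax? code "." 1).getD []) 1 "") "_").getD []

-- the single for-loop of B with its early returns
def pvB_go (exact : PySem.Set String) (pfx : String) (required_actions : List String) : List String → Bool
  | [] => false
  | code :: rest =>
    if PySem.Set.contains exact code then true
    else if PySem.Str.startswith code pfx then
      if required_actions.all (fun action => (pvB_userActions code).contains action) then true
      else pvB_go exact pfx required_actions rest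
    else pvB_go exact pfx required_actions rest

def check_feature_permission_py_alt (user_permission_codes : List String) (resource_type : String) (required_actions : List String) : Bool :=
  let pfx := resource_type ++ "."
  let exact := PySem.Set.ofList (required_actions.map (fun action => pfx ++ action))
  pvB_go exact pfx required_actions user_permission_codes

-- ===== PRECONDITION & SPEC =====
def Spec_check_feature_permission_py (user_permission_codes : List String) (resource_type : String) (required_actions : List String) (out : Bool) : Prop := out = check_feature_permission_py_alt user_permission_codes resource_type required_actions
instance (user_permission_codes : List String) (resource_type : String) (required_actions : List String) (out : Bool) : Decidable (Spec_check_feature_permission_py user_permission_codes resource_type required_actions out) := by unfold Spec_check_feature_permission_py; infer_instance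

-- ===== CLAIM (what is proved, stated in full; the proofs are below) =====
def Claim_equal_check_feature_permission_py : Prop := ∀ (user_permission_codes : List String) (resource_type : String) (required_actions : List String), Dom_check_feature_permission_py user_permission_codes resource_type required_actions → Spec_check_feature_permission_py user_permission_codes resource_type required_actions (check_feature_permission_py user_permission_codes resource_type required_actions)

-- ===== LEMMAS AND PROOFS =====

-- B's loop is an `any` over its per-code predicate
theorem pvB_go_eq_any (exact : PySem.Set String) (pfx : String) (req : List String) (codes : List String) :
    pvB_go exact pfx req codes
      = codes.any (fun code => PySem.Set.contains exact code ||
          (PySem.Str.startswith code pfx &&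
            req.all (fun action => (pvB_userActions code).contains action))) := by
  induction codes with
  | nil => rfl
  | cons c rest ih =>
    simp only [pvB_go, List.any_cons, ← ih]
    split_ifs with h1 h2 h3 <;> simp_all

-- a code starting with "resource_type." contains a '.'
theorem pv_startswith_dot (rt code : String)
    (h : PySem.Str.startswith code (rt ++ ".") = true) : PySem.Str.isIn "." code = true := by
  rw [PySem.Str.startswith_eq, PySem.Chars.startswith_iff] at h
  rw [PySem.Str.isIn_iff_infix]
  have hpre : (rt ++ ".").toList = rt.toList ++ ['.'] := by simp
  rw [hpre] at h
  exact ((List.suffix_append rt.toList ['.']).isInfix).trans h.isInfix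

-- A's first loop (over actions) tests the same existence as membership in B's exact set
theorem pv_exact_swap (codes : List String) (rt : String) (req : List String) :
    (req.any fun action => codes.contains (rt ++ "." ++ action))
      = codes.any (fun code =>
          PySem.Set.contains (PySem.Set.ofList (req.map (fun action => rt ++ "." ++ action))) code) := by
  rw [Bool.eq_iff_iff]
  simp only [List.any_eq_true, List.contains_iff_mem, PySem.Set.contains,
    PySem.Set.mem_ofList, List.mem_map]
  constructor
  · rintro ⟨a, ha, hc⟩
    exact ⟨_, hc, a, ha, rfl⟩
  · rintro ⟨c, hc, a, ha, rfl⟩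
    exact ⟨a, ha, hc⟩

-- the per-code compound test of A equals B's (a prefix-matching code always contains '.')
theorem pv_comp_eq (rt code : String) (req : List String) :
    (if PySem.Str.startswith code (rt ++ ".") then
       if PySem.Str.isIn "." code then
         req.all (fun action => (pvA_userActions code).contains action)
       else false
     else false)
    = (PySem.Str.startswith code (rt ++ ".") &&
        req.all (fun action => (pvB_userActions code).contains action)) := by
  cases hx : PySem.Str.startswith code (rt ++ ".") with
  | false => simp
  | true =>
    rw [pv_startswith_dot rt code hx]
    simp [pvA_userActions, pvB_userActions]

-- any distributes over || of predicates
theorem pv_any_or (l : List String) (p q : String → Bool) :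
    (l.any fun x => p x || q x) = (l.any p || l.any q) := by
  induction l with
  | nil => rfl
  | cons a t ih => simp only [List.any_cons, ih]; cases p a <;> cases q a <;> simp

-- ===== VERDICT (by name: the statement is the Claim_ definition above) =====
theorem check_feature_permission_py_spec : Claim_equal_check_feature_permission_py := by
  intro codes rt req _
  unfold Spec_check_feature_permission_py check_feature_permission_py check_feature_permission_py_alt
  rw [pvB_go_eq_any, pv_any_or, ← pv_exact_swap]
  simp only [pv_comp_eq]
  cases h : (req.any fun action => codes.contains (rt ++ "." ++ action)) <;> simp
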